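-- pv_equiv track=rewrite | github.com/Whoagir/informatic_ege_helper | 12/Py/12-325.py | f
-- ===== SOURCE A (Python) =====
-- def f( s ):
--   while '>1' in s or '>2' in s or '>0' in s:
--     if '>1' in s:
--       s = s.replace( '>1', '22>', 1 )
--     if '>2' in s:
--       s = s.replace( '>2', '2>', 1 )
--     if '>0' in s:
--       s = s.replace( '>0', '1>', 1 )
--   return s
-- ===== SOURCE B (Python) =====
-- # Single right-to-left stack pass: keep the normal form of the processed suffix
-- # (stored reversed); each marker consumes the digit run at its right, emitting
-- # its rewriting before itself.  One pass instead of A's repeated full scans.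
-- def f(s):
--     res = []  # chars of the suffix's normal form, in reverse order
--     for c in reversed(s):
--         if c != '>':
--             res.append(c)
--             continue
--         out = []
--         while res and res[-1] in '012':
--             d = res.pop()
--             if d == '1':
--                 out.append('2')
--                 out.append('2')
--             else:
--                 out.append('1' if d == '0' else '2')
--         res.append('>')
--         res.extend(reversed(out))
--     return ''.join(reversed(res))
-- ===== Notes on version B (the rewrite author's own statement) =====
-- stated objective: alternative
-- what changed: A repeatedly rescans the whole string for a two-character redex and rewrites one occurrence until a fixpoint; B builds the same normal form in a single right-to-left stack pass, expanding the digit run after each marker directly.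
import Mathlib
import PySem

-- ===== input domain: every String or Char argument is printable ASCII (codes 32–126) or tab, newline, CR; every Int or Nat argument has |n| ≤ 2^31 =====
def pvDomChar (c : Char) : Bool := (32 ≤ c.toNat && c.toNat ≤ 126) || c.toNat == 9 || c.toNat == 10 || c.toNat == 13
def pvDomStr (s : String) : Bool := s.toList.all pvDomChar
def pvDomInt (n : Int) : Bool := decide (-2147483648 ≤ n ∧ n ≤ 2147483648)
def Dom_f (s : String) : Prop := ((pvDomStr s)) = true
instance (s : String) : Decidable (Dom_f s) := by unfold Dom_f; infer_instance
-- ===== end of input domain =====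

-- B replaces A's rescan-until-fixpoint loop by ONE right-to-left stack pass (objective: alternative).

-- ===== PORT A =====
-- s.replace(p, r, 1) for a nonempty literal pattern p: replace the FIRST occurrence.
-- (exact for nonempty p; PySem.Str.replace has no count parameter, so ported by hand)
def replaceFirst (p r : List Char) : List Char → List Char
  | [] => []
  | c :: rest =>
      if p.isPrefixOf (c :: rest) then r ++ (c :: rest).drop p.length
      else c :: replaceFirst p r rest

-- one pass of the while-loop body (the three conditional first-occurrence replaces)
def stepA (l : List Char) : List Char :=
  let l1 := if PySem.Chars.isIn ['>', '1'] l then replaceFirst ['>', '1'] ['2', '2', '>'] l else l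
  let l2 := if PySem.Chars.isIn ['>', '2'] l1 then replaceFirst ['>', '2'] ['2', '>'] l1 else l1
  if PySem.Chars.isIn ['>', '0'] l2 then replaceFirst ['>', '0'] ['1', '>'] l2 else l2

-- termination measure: each digit weighs (2 for '0'/'1', 1 for '2') times the number of '>' to its left
def wgt (c : Char) : Nat := if c = '0' then 2 else if c = '1' then 2 else if c = '2' then 1 else 0

def mu (k : Nat) : List Char → Nat
  | [] => 0
  | c :: r => if c = '>' then mu (k + 1) r else wgt c * k + mu k r

-- a strict drop at the head propagates through any left context
theorem mu_ctx (x y : List Char) (hxy : ∀ j, mu j x < mu j y) :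
    ∀ (u : List Char) (k : Nat), mu k (u ++ x) < mu k (u ++ y) := by
  intro u
  induction u with
  | nil => exact hxy
  | cons c u ih =>
      intro k
      by_cases hc : c = '>' <;> simp [mu, hc] <;> exact ih _

-- an occurrence of a nonempty pattern p splits l, and replaceFirst rewrites ONE such occurrence
theorem replaceFirst_split (p r : List Char) (hp : p ≠ []) :
    ∀ l, PySem.Chars.isIn p l = true →
    ∃ u v, l = u ++ p ++ v ∧ replaceFirst p r l = u ++ r ++ v := by
  intro l h
  rw [PySem.Chars.isIn_iff_infix] at h
  induction l with
  | nil => exact absurd (List.infix_nil.mp h) hp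
  | cons c rest ih =>
      by_cases hpre : p.isPrefixOf (c :: rest)
      · obtain ⟨t, ht⟩ := List.isPrefixOf_iff_prefix.mp hpre
        refine ⟨[], (c :: rest).drop p.length, ?_, ?_⟩
        · simpa using by rw [← ht, List.drop_left]
        · simp [replaceFirst, hpre]
      · have h' : p <:+: rest := by
          rcases List.infix_cons_iff.mp h with hpf | h'
          · exact absurd (List.isPrefixOf_iff_prefix.mpr hpf) hpre
          · exact h'
        obtain ⟨u, v, hl, hr⟩ := ih h'
        exact ⟨c :: u, v, by simp [hl], by simp [replaceFirst, hpre, hr]⟩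

theorem mu_replaceFirst_lt (p r : List Char) (hp : p ≠ [])
    (hpr : ∀ j v, mu j (r ++ v) < mu j (p ++ v))
    (l : List Char) (h : PySem.Chars.isIn p l = true) (k : Nat) :
    mu k (replaceFirst p r l) < mu k l := by
  obtain ⟨u, v, hl, hrw⟩ := replaceFirst_split p r hp l h
  rw [hrw, hl, List.append_assoc, List.append_assoc]
  exact mu_ctx (r ++ v) (p ++ v) (fun j => hpr j v) u k

theorem mu_rule1 : ∀ (j : Nat) (v : List Char),
    mu j (['2', '2', '>'] ++ v) < mu j (['>', '1'] ++ v) := by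
  intro j v; simp [mu, wgt]; omega

theorem mu_rule2 : ∀ (j : Nat) (v : List Char),
    mu j (['2', '>'] ++ v) < mu j (['>', '2'] ++ v) := by
  intro j v; simp [mu, wgt]

theorem mu_rule3 : ∀ (j : Nat) (v : List Char),
    mu j (['1', '>'] ++ v) < mu j (['>', '0'] ++ v) := by
  intro j v; simp [mu, wgt]

theorem mu_stepA_lt (l : List Char)
    (h : (PySem.Chars.isIn ['>', '1'] l || PySem.Chars.isIn ['>', '2'] l || PySem.Chars.isIn ['>', '0'] l) = true) :
    mu 0 (stepA l) < mu 0 l := by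
  simp only [stepA]
  have le1 : ∀ m, mu 0 (if PySem.Chars.isIn ['>', '2'] m then replaceFirst ['>', '2'] ['2', '>'] m else m) ≤ mu 0 m := by
    intro m; split
    · exact (mu_replaceFirst_lt _ _ (by simp) mu_rule2 m ‹_› 0).le
    · exact le_rfl
  have le2 : ∀ m, mu 0 (if PySem.Chars.isIn ['>', '0'] m then replaceFirst ['>', '0'] ['1', '>'] m else m) ≤ mu 0 m := by
    intro m; split
    · exact (mu_replaceFirst_lt _ _ (by simp) mu_rule3 m ‹_› 0).le
    · exact le_rfl
  by_cases h1 : PySem.Chars.isIn ['>', '1'] l = true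
  · rw [if_pos h1]
    calc mu 0 _ ≤ _ := le2 _
      _ ≤ _ := le1 _
      _ < mu 0 l := mu_replaceFirst_lt _ _ (by simp) mu_rule1 l h1 0
  · rw [if_neg h1]
    by_cases h2 : PySem.Chars.isIn ['>', '2'] l = true
    · rw [if_pos h2]
      calc mu 0 _ ≤ _ := le2 _
        _ < mu 0 l := mu_replaceFirst_lt _ _ (by simp) mu_rule2 l h2 0
    · rw [if_neg h2]
      have h3 : PySem.Chars.isIn ['>', '0'] l = true := by
        rcases Bool.or_eq_true_iff.mp h with h' | h3
        · rcases Bool.or_eq_true_iff.mp h' with h1' | h2'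
          · exact absurd h1' h1
          · exact absurd h2' h2
        · exact h3
      rw [if_pos h3]
      exact mu_replaceFirst_lt _ _ (by simp) mu_rule3 l h3 0

def loopA (l : List Char) : List Char :=
  if h : (PySem.Chars.isIn ['>', '1'] l || PySem.Chars.isIn ['>', '2'] l || PySem.Chars.isIn ['>', '0'] l) = true then
    loopA (stepA l)
  else l
termination_by mu 0 l
decreasing_by exact mu_stepA_lt l h

def f (s : String) : String := String.ofList (loopA s.toList)

-- ===== PORT B =====
-- Source B keeps the suffix's normal form in a reversed Python list with append/pop at
-- its end; here that buffer is the same sequence as an in-order list, cons/match at its front.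
-- expand = Source B's inner while: pop the digit run and emit its rewriting, then the marker.
def expand : List Char → List Char
  | [] => ['>']
  | c :: r =>
      if c = '0' then '1' :: expand r
      else if c = '1' then '2' :: '2' :: expand r
      else if c = '2' then '2' :: expand r
      else '>' :: c :: r

-- Source B's `for c in reversed(s)` loop over that buffer = a right fold
def nf (l : List Char) : List Char :=
  l.foldr (fun c t => if c = '>' then expand t else c :: t) []

def f_alt (s : String) : String := String.ofList (nf s.toList)

-- ===== PRECONDITION & SPEC =====
def Spec_f (s : String) (out : String) : Prop := out = f_alt s
instance (s : String) (out : String) : Decidable (Spec_f s out) := by unfold Spec_f; infer_instance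

-- ===== CLAIM (what is proved, stated in full; the proofs are below) =====
def Claim_equal_f : Prop := ∀ (s : String), Dom_f s → Spec_f s (f s)

-- ===== LEMMAS AND PROOFS =====

theorem nf_ctx (u x y : List Char) (hxy : nf x = nf y) : nf (u ++ x) = nf (u ++ y) := by
  simp [nf, List.foldr_append]
  rw [show x.foldr _ [] = nf x from rfl, show y.foldr _ [] = nf y from rfl, hxy]

theorem nf_rule1 (v : List Char) : nf (['2', '2', '>'] ++ v) = nf (['>', '1'] ++ v) := by
  simp [nf, expand]

theorem nf_rule2 (v : List Char) : nf (['2', '>'] ++ v) = nf (['>', '2'] ++ v) := by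
  simp [nf, expand]

theorem nf_rule3 (v : List Char) : nf (['1', '>'] ++ v) = nf (['>', '0'] ++ v) := by
  simp [nf, expand]

theorem nf_replaceFirst (p r : List Char) (hp : p ≠ [])
    (hpr : ∀ v, nf (r ++ v) = nf (p ++ v))
    (l : List Char) (h : PySem.Chars.isIn p l = true) :
    nf (replaceFirst p r l) = nf l := by
  obtain ⟨u, v, hl, hrw⟩ := replaceFirst_split p r hp l h
  rw [hrw, hl, List.append_assoc, List.append_assoc]
  exact nf_ctx u (r ++ v) (p ++ v) (hpr v)

theorem nf_stepA (l : List Char) : nf (stepA l) = nf l := by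
  unfold stepA
  have g : ∀ (p r : List Char), p ≠ [] → (∀ v, nf (r ++ v) = nf (p ++ v)) →
      ∀ m, nf (if PySem.Chars.isIn p m then replaceFirst p r m else m) = nf m := by
    intro p r hp hpr m; split
    · exact nf_replaceFirst p r hp hpr m ‹_›
    · rfl
  rw [g _ _ (by simp) nf_rule3, g _ _ (by simp) nf_rule2, g _ _ (by simp) nf_rule1]

-- a string with no redex is its own normal form
theorem isIn_tail (p : List Char) (c : Char) (rest : List Char)
    (hpc : PySem.Chars.isIn p (c :: rest) = false) : PySem.Chars.isIn p rest = false := by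
  rw [PySem.Chars.isIn_eq_false_iff] at hpc ⊢
  exact fun hinf => hpc (hinf.trans (List.infix_cons_iff.mpr (Or.inr (List.infix_refl rest))))

theorem nf_fix_aux : ∀ l : List Char,
    PySem.Chars.isIn ['>', '1'] l = false → PySem.Chars.isIn ['>', '2'] l = false →
    PySem.Chars.isIn ['>', '0'] l = false → nf l = l := by
  intro l
  induction l with
  | nil => intro _ _ _; rfl
  | cons c rest ih =>
      intro h1 h2 h0
      have ihr := ih (isIn_tail _ _ _ h1) (isIn_tail _ _ _ h2) (isIn_tail _ _ _ h0)
      by_cases hc : c = '>'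
      · rw [show nf (c :: rest) = expand (nf rest) by simp [nf, hc], ihr, hc]
        cases rest with
        | nil => rfl
        | cons d r' =>
            have notd : ∀ d' : Char, PySem.Chars.isIn ['>', d'] (c :: d :: r') = false → d ≠ d' := by
              intro d' hf he
              rw [PySem.Chars.isIn_eq_false_iff] at hf
              exact hf ⟨[], r', by simp [hc, he]⟩
            have hd0 := notd '0' h0
            have hd1 := notd '1' h1
            have hd2 := notd '2' h2
            simp [expand, hd0, hd1, hd2]
      · rw [show nf (c :: rest) = c :: nf rest by simp [nf, hc], ihr]

theorem nf_fix (l : List Char)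
    (h : (PySem.Chars.isIn ['>', '1'] l || PySem.Chars.isIn ['>', '2'] l || PySem.Chars.isIn ['>', '0'] l) ≠ true) :
    nf l = l := by
  have hf := Bool.eq_false_iff.mpr h
  rw [Bool.or_eq_false_iff, Bool.or_eq_false_iff] at hf
  exact nf_fix_aux l hf.1.1 hf.1.2 hf.2

theorem loopA_eq_nf (l : List Char) : loopA l = nf l := by
  induction l using loopA.induct with
  | case1 l h ih => rw [loopA, dif_pos h, ih, nf_stepA]
  | case2 l h => rw [loopA, dif_neg h]; exact (nf_fix l h).symm

-- ===== VERDICT (by name: the statement is the Claim_ definition above) =====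
theorem f_spec : Claim_equal_f := by
  intro s _
  unfold Spec_f f f_alt
  exact congrArg String.ofList (loopA_eq_nf s.toList)
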